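-- pv_equiv track=rewrite | github.com/PacktPublishing/AI-Networking-Cookbook-First-Edition | ch10/Recipe_10_4/incident_response_system.py | _extract_port_from_cam
-- ===== SOURCE A (Python) =====
-- from typing import Dict, List, Optional, Any
--
-- def _extract_port_from_cam(cam_output: str) -> Optional[str]:
--     """Extract port from CAM table output"""
--     for line in cam_output.split('\n'):
--         if 'Gi' in line or 'Fa' in line or 'Eth' in line:
--             parts = line.split()
--             for part in parts:
--                 if any(x in part for x in ['Gi', 'Fa', 'Eth']):
--                     return part
--     return None
-- ===== SOURCE B (Python) =====
-- from typing import Optional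
--
--
-- def _extract_port_from_cam(cam_output: str) -> Optional[str]:
--     """Extract port from CAM table output"""
--     # One flat pass over whitespace-delimited tokens of the whole output:
--     # split('\n') + per-line split() + the redundant per-line substring guard
--     # collapse into a single split(), since split() already breaks on newlines.
--     return next(
--         (tok for tok in cam_output.split()
--          if 'Gi' in tok or 'Fa' in tok or 'Eth' in tok),
--         None,
--     )
-- ===== Notes on version B (the rewrite author's own statement) =====
-- stated objective: idiomatic
-- what changed: Replaces the nested line/token loops with the redundant per-line substring guard by a single flat generator over cam_output.split() tokens (split() already breaks on newlines, so the line level and the guard disappear).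
import Mathlib
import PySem

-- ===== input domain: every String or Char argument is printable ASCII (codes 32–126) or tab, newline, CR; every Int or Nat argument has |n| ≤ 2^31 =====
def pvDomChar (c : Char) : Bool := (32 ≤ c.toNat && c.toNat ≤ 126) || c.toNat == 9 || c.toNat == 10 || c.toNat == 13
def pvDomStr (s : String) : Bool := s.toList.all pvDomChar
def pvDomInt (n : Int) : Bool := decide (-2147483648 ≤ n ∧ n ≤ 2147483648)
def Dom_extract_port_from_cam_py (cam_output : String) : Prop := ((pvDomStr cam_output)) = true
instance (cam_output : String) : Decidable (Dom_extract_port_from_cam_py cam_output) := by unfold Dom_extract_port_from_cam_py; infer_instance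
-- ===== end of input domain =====

-- B replaces A's nested line/token loops (with their redundant per-line substring
-- guard) by one flat scan over the whitespace tokens of the whole string (idiomatic).

-- ===== PORT A =====
-- inner 'for part in parts' loop of A
def pvPartsLoop : List String → Option String
  | [] => none
  | p :: ps =>
    if (["Gi", "Fa", "Eth"].any fun x => PySem.Str.isIn x p) then some p
    else pvPartsLoop ps

-- outer 'for line in cam_output.split('\n')' loop of A
def pvLinesLoop : List String → Option String
  | [] => none
  | line :: rest =>
    if PySem.Str.isIn "Gi" line || PySem.Str.isIn "Fa" line || PySem.Str.isIn "Eth" line then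
      match pvPartsLoop (PySem.Str.split₀ line) with
      | some p => some p
      | none => pvLinesLoop rest
    else pvLinesLoop rest

-- cam_output.split('\n'): separator is non-empty, so Python never raises;
-- PySem.Chars.splitOn is the sep ≠ "" form of str.split(sep).
def extract_port_from_cam_py (cam_output : String) : Option String :=
  pvLinesLoop ((PySem.Chars.splitOn cam_output.toList "\n".toList).map String.ofList)

-- ===== PORT B =====
def extract_port_from_cam_py_alt (cam_output : String) : Option String :=
  (PySem.Str.split₀ cam_output).find? fun tok =>
    PySem.Str.isIn "Gi" tok || PySem.Str.isIn "Fa" tok || PySem.Str.isIn "Eth" tok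

-- ===== PRECONDITION & SPEC =====
def Spec_extract_port_from_cam_py (cam_output : String) (out : Option String) : Prop := out = extract_port_from_cam_py_alt cam_output
instance (cam_output : String) (out : Option String) : Decidable (Spec_extract_port_from_cam_py cam_output out) := by unfold Spec_extract_port_from_cam_py; infer_instance

-- ===== CLAIM (what is proved, stated in full; the proofs are below) =====
def Claim_equal_extract_port_from_cam_py : Prop := ∀ (cam_output : String), Dom_extract_port_from_cam_py cam_output → Spec_extract_port_from_cam_py cam_output (extract_port_from_cam_py cam_output)

-- ===== LEMMAS AND PROOFS =====

-- tokens of `pre ++ s` where `pre` is the (whitespace-free) token prefix read so far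
def pvTok (pre s : List Char) : List (List Char) :=
  match s with
  | [] => if pre = [] then [] else [pre]
  | c :: rest =>
    if PySem.Chars.isspace c then (if pre = [] then [] else [pre]) ++ pvTok [] rest
    else pvTok (pre ++ [c]) rest

-- lines of `pre ++ s` where `pre` is the line prefix read so far
def pvLines (pre s : List Char) : List (List Char) :=
  match s with
  | [] => [pre]
  | c :: rest => if c = '\n' then pre :: pvLines [] rest else pvLines (pre ++ [c]) rest

def pvMatchC (cs : List Char) : Bool :=
  PySem.Chars.isIn ['G', 'i'] cs || PySem.Chars.isIn ['F', 'a'] cs || PySem.Chars.isIn ['E', 't', 'h'] cs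

theorem pvSplit₀_go_eq (s : List Char) : ∀ cur acc,
    PySem.Chars.split₀.go s cur acc = acc.reverse ++ pvTok cur.reverse s := by
  induction s with
  | nil => intro cur acc; by_cases h : cur = [] <;> simp [PySem.Chars.split₀.go, pvTok, h]
  | cons c rest ih =>
    intro cur acc
    by_cases hsp : PySem.Chars.isspace c
    · by_cases h : cur = [] <;> simp [PySem.Chars.split₀.go, pvTok, hsp, h, ih]
    · simp [PySem.Chars.split₀.go, pvTok, hsp, ih]

theorem pvSplit₀_eq (cs : List Char) : PySem.Chars.split₀ cs = pvTok [] cs := by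
  simpa using pvSplit₀_go_eq cs [] []

theorem pvSplitOn_go_eq (l : List Char) : ∀ fuel cur acc, l.length < fuel →
    PySem.Chars.splitOn.go ['\n'] fuel l cur acc = acc.reverse ++ pvLines cur.reverse l := by
  induction l with
  | nil =>
    intro fuel cur acc h
    match fuel with
    | fuel + 1 => simp [PySem.Chars.splitOn.go, pvLines]
  | cons c rest ih =>
    intro fuel cur acc h
    match fuel with
    | fuel + 1 =>
      by_cases hc : c = '\n'
      · subst hc
        simp only [PySem.Chars.splitOn.go, List.isPrefixOf, beq_self_eq_true, Bool.true_and,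
          if_true]
        rw [show List.drop ['\n'].length ('\n' :: rest) = rest from rfl,
          ih fuel [] (cur.reverse :: acc) (by simpa using h)]
        simp [pvLines]
      · have hpre : (['\n'].isPrefixOf (c :: rest)) = false := by
          simp [List.isPrefixOf]; exact fun h' => (hc h'.symm).elim
        simp only [PySem.Chars.splitOn.go, hpre, Bool.false_eq_true, if_false]
        rw [ih fuel (c :: cur) acc (by simpa using h)]
        simp [pvLines, hc]

theorem pvSplitOn_eq (cs : List Char) :
    PySem.Chars.splitOn cs ['\n'] = pvLines [] cs := by
  have := pvSplitOn_go_eq cs (cs.length + 1) [] [] (by omega)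
  simpa [PySem.Chars.splitOn] using this

-- a whitespace character splits the token stream
theorem pvTok_append_space {w : Char} (hw : PySem.Chars.isspace w = true) (v : List Char) :
    ∀ u a, pvTok a (u ++ w :: v) = pvTok a u ++ pvTok [] v := by
  intro u
  induction u with
  | nil => intro a; by_cases h : a = [] <;> simp [pvTok, hw, h]
  | cons d u' ih =>
    intro a
    by_cases hd : PySem.Chars.isspace d
    · by_cases h : a = [] <;> simp [pvTok, hd, h, ih]
    · simp [pvTok, hd, ih]

theorem pvLines_flatMap_tok (s : List Char) : ∀ pre,
    (pvLines pre s).flatMap (pvTok []) = pvTok [] (pre ++ s) := by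
  induction s with
  | nil => intro pre; simp [pvLines]
  | cons c rest ih =>
    intro pre
    by_cases hc : c = '\n'
    · subst hc
      have hsp : PySem.Chars.isspace '\n' = true := by decide
      rw [show pvLines pre ('\n' :: rest) = pre :: pvLines [] rest from by simp [pvLines],
        List.flatMap_cons, ih, pvTok_append_space hsp rest pre, List.nil_append]
    · rw [show pvLines pre (c :: rest) = pvLines (pre ++ [c]) rest from by simp [pvLines, hc], ih]
      simp

-- every token is an infix of the text it was cut from
theorem pvTok_mem_infix (s : List Char) : ∀ pre t, t ∈ pvTok pre s → t <:+: pre ++ s := by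
  induction s with
  | nil =>
    intro pre t ht
    by_cases h : pre = [] <;> simp [pvTok, h] at ht
    exact ⟨[], [], by simp [ht]⟩
  | cons c rest ih =>
    intro pre t ht
    by_cases hsp : PySem.Chars.isspace c
    · simp only [pvTok, hsp, if_true, List.mem_append] at ht
      rcases ht with ht | ht
      · by_cases h : pre = [] <;> simp [h] at ht
        exact ⟨[], c :: rest, by simp [ht]⟩
      · have := ih [] t ht
        calc t <:+: rest := by simpa using this
          _ <:+: pre ++ c :: rest := ⟨pre ++ [c], [], by simp⟩
    · simp only [pvTok, hsp] at ht
      have := ih (pre ++ [c]) t (by simpa using ht)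
      simpa using this

-- if a needle is not an infix of a line, no token of the line matches it
theorem pvFind?_tok_none {l : List Char}
    (hGi : ¬ (['G', 'i'] <:+: l)) (hFa : ¬ (['F', 'a'] <:+: l))
    (hEth : ¬ (['E', 't', 'h'] <:+: l)) :
    (pvTok [] l).find? pvMatchC = none := by
  rw [List.find?_eq_none]
  intro t ht
  have htl : t <:+: l := by simpa using pvTok_mem_infix l [] t ht
  simp only [pvMatchC, Bool.or_eq_true, not_or, Bool.not_eq_true]
  refine ⟨⟨?_, ?_⟩, ?_⟩ <;> rw [PySem.Chars.isIn_eq_false_iff] <;> intro hin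
  · exact hGi (hin.trans htl)
  · exact hFa (hin.trans htl)
  · exact hEth (hin.trans htl)

theorem pvPartsLoop_eq (ps : List (List Char)) :
    pvPartsLoop (ps.map String.ofList) = (ps.find? pvMatchC).map String.ofList := by
  induction ps with
  | nil => simp [pvPartsLoop]
  | cons p ps ih =>
    have hany : (["Gi", "Fa", "Eth"].any fun x => PySem.Str.isIn x (String.ofList p)) = pvMatchC p := by
      simp [pvMatchC, PySem.Str.isIn_eq, Bool.or_assoc]
    cases h : pvMatchC p
    · rw [List.map_cons, pvPartsLoop, hany, h, if_neg (by simp), ih,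
        List.find?_cons_of_neg (by simp [h])]
    · rw [List.map_cons, pvPartsLoop, hany, h, if_pos rfl,
        List.find?_cons_of_pos h, Option.map_some]

theorem pvLinesLoop_eq (ls : List (List Char)) :
    pvLinesLoop (ls.map String.ofList) = ((ls.flatMap (pvTok [])).find? pvMatchC).map String.ofList := by
  induction ls with
  | nil => simp [pvLinesLoop]
  | cons l ls ih =>
    have hsplit : PySem.Str.split₀ (String.ofList l) = (pvTok [] l).map String.ofList := by
      simp [PySem.Str.split₀, pvSplit₀_eq]
    have hguard : (PySem.Str.isIn "Gi" (String.ofList l) || PySem.Str.isIn "Fa" (String.ofList l)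
        || PySem.Str.isIn "Eth" (String.ofList l))
        = (PySem.Chars.isIn ['G', 'i'] l || PySem.Chars.isIn ['F', 'a'] l
          || PySem.Chars.isIn ['E', 't', 'h'] l) := by
      simp [PySem.Str.isIn_eq]
    rw [List.flatMap_cons, List.find?_append, List.map_cons, pvLinesLoop, hguard]
    by_cases hg : (PySem.Chars.isIn ['G', 'i'] l || PySem.Chars.isIn ['F', 'a'] l
        || PySem.Chars.isIn ['E', 't', 'h'] l) = true
    · rw [if_pos hg, hsplit, pvPartsLoop_eq]
      cases hf : (pvTok [] l).find? pvMatchC <;> simp [ih]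
    · have hnone : (pvTok [] l).find? pvMatchC = none := by
        simp only [Bool.or_eq_true, not_or, Bool.not_eq_true] at hg
        refine pvFind?_tok_none ?_ ?_ ?_ <;> rw [← PySem.Chars.isIn_eq_false_iff] <;> tauto
      rw [if_neg (by simp [hg]), hnone, ih]
      simp

-- ===== VERDICT (by name: the statement is the Claim_ definition above) =====
theorem extract_port_from_cam_py_spec : Claim_equal_extract_port_from_cam_py := by
  intro cam_output _
  unfold Spec_extract_port_from_cam_py extract_port_from_cam_py extract_port_from_cam_py_alt
  rw [show "\n".toList = ['\n'] from rfl, pvSplitOn_eq, pvLinesLoop_eq, pvLines_flatMap_tok]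
  have hpred : ((fun tok => PySem.Str.isIn "Gi" tok || PySem.Str.isIn "Fa" tok
      || PySem.Str.isIn "Eth" tok) ∘ String.ofList) = pvMatchC := by
    funext t
    simp [pvMatchC, PySem.Str.isIn_eq, String.toList_ofList]
  rw [PySem.Str.split₀, pvSplit₀_eq, List.find?_map, hpred, List.nil_append]
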